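-- pv_equiv track=rewrite | github.com/hb20007/coding-challenge-solutions | advent-of-code/2019/day-04/partTwo.py | has_double
-- ===== SOURCE A (Python) =====
-- from typing import List
--
-- def has_double(pwd: List[str]):
-- 	end = len(pwd) - 1
--
-- 	for i in range(end):
-- 		if pwd[i] == pwd[i + 1] and \
-- 			(i == 0 or pwd[i] != pwd[i - 1]) and \
-- 			(i == end - 1 or pwd[i] != pwd[i + 2]):
-- 			return True
-- 	return False
-- ===== SOURCE B (Python) =====
-- from itertools import groupby
-- from typing import List
--
-- def has_double(pwd: List[str]):
--     return any(sum(1 for _ in g) == 2 for _, g in groupby(pwd))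
-- ===== Notes on version B (the rewrite author's own statement) =====
-- stated objective: idiomatic
-- what changed: Replaces the index-based scan with its i==0 / i==end-1 boundary guards and pwd[i-1]/pwd[i+2] lookarounds by itertools.groupby run-length grouping: return True iff some run has length exactly 2.
import Mathlib
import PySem

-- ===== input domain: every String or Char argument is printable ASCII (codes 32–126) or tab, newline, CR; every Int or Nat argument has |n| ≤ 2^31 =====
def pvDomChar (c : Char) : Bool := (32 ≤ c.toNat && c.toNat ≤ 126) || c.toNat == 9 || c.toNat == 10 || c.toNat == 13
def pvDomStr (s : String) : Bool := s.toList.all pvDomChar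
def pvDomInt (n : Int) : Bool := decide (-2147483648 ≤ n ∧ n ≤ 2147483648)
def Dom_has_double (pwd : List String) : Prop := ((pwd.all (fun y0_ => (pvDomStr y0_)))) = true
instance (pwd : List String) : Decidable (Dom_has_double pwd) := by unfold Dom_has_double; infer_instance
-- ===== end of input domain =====

-- B replaces A's index-based scan (boundary guards i==0 / i==end-1, lookarounds pwd[i-1], pwd[i+2])
-- with run-length grouping (itertools.groupby): True iff some run of equal adjacent elements has length exactly 2.

-- ===== PORT A =====
-- the 'for i in range(end)' loop with early return, index i over Int, pwd[..] via pyGet?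
def loopA (pwd : List String) (e : Int) (i : Int) : Bool :=
  if h : i < e then
    if (PySem.List.pyGet? pwd i == PySem.List.pyGet? pwd (i + 1))
        && ((i == 0) || (PySem.List.pyGet? pwd i != PySem.List.pyGet? pwd (i - 1)))
        && ((i == e - 1) || (PySem.List.pyGet? pwd i != PySem.List.pyGet? pwd (i + 2)))
    then true
    else loopA pwd e (i + 1)
  else false
termination_by (e - i).toNat
decreasing_by omega

def has_double (pwd : List String) : Bool :=
  loopA pwd ((pwd.length : Int) - 1) 0

-- ===== PORT B =====
-- Source B's groupby pass: take the first run of equal elements; True if its length is exactly 2,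
-- otherwise recurse on the remaining groups.
def has_double_alt : List String → Bool
  | [] => false
  | x :: xs =>
      if (xs.takeWhile (· == x)).length + 1 == 2 then true
      else has_double_alt (xs.dropWhile (· == x))
termination_by l => l.length
decreasing_by exact Nat.lt_succ_of_le (List.length_dropWhile_le _ _)

-- ===== PRECONDITION & SPEC =====
def Spec_has_double (pwd : List String) (out : Bool) : Prop := out = has_double_alt pwd
instance (pwd : List String) (out : Bool) : Decidable (Spec_has_double pwd out) := by unfold Spec_has_double; infer_instance

-- ===== CLAIM (what is proved, stated in full; the proofs are below) =====
def Claim_equal_has_double : Prop := ∀ (pwd : List String), Dom_has_double pwd → Spec_has_double pwd (has_double pwd)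

-- ===== LEMMAS AND PROOFS =====

-- structural reformulation of A's loop: scan with the previous element as state
def scanB (p : Option String) : List String → Bool
  | [] => false
  | [_] => false
  | a :: b :: rest =>
      if (a == b) && (some a != p) && (some a != rest.head?) then true
      else scanB (some a) (b :: rest)

-- A's loop at index n equals scanB with prev = pwd[n-1] (none at the start) on the suffix
theorem scanB_step (p : Option String) (a b : String) (rest : List String) :
    scanB p (a :: b :: rest)
      = if (a == b) && (some a != p) && (some a != rest.head?) then true
        else scanB (some a) (b :: rest) := rfl

theorem loopA_eq_scanB (pwd : List String) :
    ∀ (k n : Nat), pwd.length - n ≤ k →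
      loopA pwd ((pwd.length : Int) - 1) (n : Int)
        = scanB (if n = 0 then none else pwd[n - 1]?) (pwd.drop n) := by
  intro k
  induction k with
  | zero =>
      intro n hk
      have hn : pwd.length ≤ n := by omega
      rw [loopA.eq_def, dif_neg (by omega : ¬ ((n : Int) < (pwd.length : Int) - 1)),
          List.drop_eq_nil_of_le hn]
      rfl
  | succ k ih =>
      intro n hk
      by_cases hlt : n + 1 < pwd.length
      · have hn : n < pwd.length := by omega
        have hd1 : pwd.drop n = pwd[n] :: pwd.drop (n + 1) := List.drop_eq_getElem_cons hn
        have hd2 : pwd.drop (n + 1) = pwd[n + 1] :: pwd.drop (n + 2) :=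
          List.drop_eq_getElem_cons hlt
        have hg0 : PySem.List.pyGet? pwd (n : Int) = some pwd[n] := by
          rw [PySem.List.pyGet?_natCast]; exact List.getElem?_eq_getElem hn
        have hg1 : PySem.List.pyGet? pwd ((n : Int) + 1) = some pwd[n + 1] := by
          rw [show ((n : Int) + 1) = ((n + 1 : Nat) : Int) by push_cast; ring,
              PySem.List.pyGet?_natCast]
          exact List.getElem?_eq_getElem hlt
        have hg2 : PySem.List.pyGet? pwd ((n : Int) + 2) = pwd[n + 2]? := by
          rw [show ((n : Int) + 2) = ((n + 2 : Nat) : Int) by push_cast; ring,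
              PySem.List.pyGet?_natCast]
        have hhead : (pwd.drop (n + 2)).head? = pwd[n + 2]? := by
          rw [List.head?_drop]
        have hrec : loopA pwd ((pwd.length : Int) - 1) ((n : Int) + 1)
            = scanB (some pwd[n]) (pwd[n + 1] :: pwd.drop (n + 2)) := by
          rw [show ((n : Int) + 1) = ((n + 1 : Nat) : Int) by push_cast; ring,
              ih (n + 1) (by omega), hd2]
          congr 1
          rw [if_neg (by omega)]
          simp [List.getElem?_eq_getElem hn]
        rw [loopA.eq_def,
            dif_pos (by omega : (n : Int) < (pwd.length : Int) - 1),
            hd1, hd2, scanB_step, hg0, hg1, hg2, hrec]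
        have c1 : ((some pwd[n] == some pwd[n + 1]) : Bool) = (pwd[n] == pwd[n + 1]) := by
          simp only [Option.some_beq_some]
        have c2 : (((n : Int) == 0) || (some pwd[n] != PySem.List.pyGet? pwd ((n : Int) - 1)))
            = (some pwd[n] != (if n = 0 then none else pwd[n - 1]?)) := by
          by_cases h0 : n = 0
          · subst h0; simp
          · rw [if_neg h0,
                show ((n : Int) == 0) = false by simp; omega,
                Bool.false_or,
                show PySem.List.pyGet? pwd ((n : Int) - 1) = pwd[n - 1]? by
                  rw [show ((n : Int) - 1) = ((n - 1 : Nat) : Int) by omega,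
                      PySem.List.pyGet?_natCast]]
        have c3 : (((n : Int) == (pwd.length : Int) - 1 - 1) || (some pwd[n] != pwd[n + 2]?))
            = (some pwd[n] != pwd[n + 2]?) := by
          by_cases h2 : n + 2 = pwd.length
          · rw [show pwd[n + 2]? = none by rw [List.getElem?_eq_none]; omega,
                show ((n : Int) == (pwd.length : Int) - 1 - 1) = true by simp; omega]
            simp
          · rw [show ((n : Int) == (pwd.length : Int) - 1 - 1) = false by simp; omega,
                Bool.false_or]
        rw [hhead, c1, c2, c3]

      · rw [loopA.eq_def, dif_neg (by omega : ¬ ((n : Int) < (pwd.length : Int) - 1))]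
        match hdd : pwd.drop n with
        | [] => rfl
        | [a] => rfl
        | a :: b :: r =>
            exfalso
            have := congrArg List.length hdd
            simp [List.length_drop] at this
            omega

theorem scanB_skip (x : String) (m : List String) :
    scanB (some x) (x :: m) = scanB (some x) m := by
  cases m with
  | nil => simp [scanB]
  | cons b m' => simp [scanB]

theorem scanB_dropWhile (x : String) (l : List String) :
    scanB (some x) l = scanB (some x) (l.dropWhile (· == x)) := by
  induction l with
  | nil => rfl
  | cons a t ih =>
      by_cases hax : a = x
      · subst hax
        rw [scanB_skip, List.dropWhile_cons_of_pos (by simp)]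
        exact ih
      · rw [List.dropWhile_cons_of_neg (by simp [hax])]

theorem head?_dropWhile_ne (x : String) (l : List String) :
    (l.dropWhile (· == x)).head? ≠ some x := by
  induction l with
  | nil => simp
  | cons a t ih =>
      by_cases hax : a = x
      · subst hax; rw [List.dropWhile_cons_of_pos (by simp)]; exact ih
      · rw [List.dropWhile_cons_of_neg (by simp [hax])]
        simp [hax]

theorem alt_nil : has_double_alt [] = false := by rw [has_double_alt.eq_def]

theorem alt_cons (x : String) (xs : List String) :
    has_double_alt (x :: xs)
      = if (xs.takeWhile (· == x)).length + 1 == 2 then true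
        else has_double_alt (xs.dropWhile (· == x)) := by
  rw [has_double_alt.eq_def]

theorem alt_single (a : String) : has_double_alt [a] = false := by
  rw [alt_cons]; simp [alt_nil]

theorem scanB_eq_alt :
    ∀ (k : Nat) (l : List String) (p : Option String), l.length ≤ k →
      (∀ x, l.head? = some x → p ≠ some x) →
      scanB p l = has_double_alt l := by
  intro k
  induction k with
  | zero =>
      intro l p hl _
      have : l = [] := List.eq_nil_of_length_eq_zero (by omega)
      subst this
      simp [scanB, alt_nil]
  | succ k ih =>
      intro l p hl hgood
      match l with
      | [] => simp [scanB, alt_nil]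
      | [a] => simp [scanB, alt_single]
      | a :: b :: rest =>
          by_cases hab : a = b
          · subst hab
            by_cases hr : rest.head? = some a
            · -- run of length ≥ 3: skip the whole run on both sides
              obtain ⟨m, rfl⟩ : ∃ m, rest = a :: m := by
                cases rest with
                | nil => simp at hr
                | cons c m => simp at hr; exact ⟨m, by rw [hr]⟩
              have hc : ((a == a) && (some a != p) && (some a != (a :: m).head?)) = false := by
                simp
              have hscan : scanB p (a :: a :: a :: m)
                  = scanB (some a) (m.dropWhile (· == a)) := by
                rw [scanB_step, hc]
                simp only [Bool.false_eq_true, if_false]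
                rw [scanB_skip, scanB_skip, scanB_dropWhile]
              rw [hscan]
              rw [ih _ (some a) (by
                    have := List.length_dropWhile_le (· == a) m
                    simp at hl ⊢; omega)
                  (by intro x hx hpx
                      exact head?_dropWhile_ne a m (by rw [hx, ← hpx]))]
              rw [show has_double_alt (a :: a :: a :: m)
                    = has_double_alt ((a :: m).dropWhile (· == a)) from ?_]
              · rw [List.dropWhile_cons_of_pos (by simp)]
              rw [alt_cons]
              have htw : List.takeWhile (fun y => y == a) (a :: a :: m)
                  = a :: a :: List.takeWhile (fun y => y == a) m := by
                rw [List.takeWhile_cons_of_pos (by simp), List.takeWhile_cons_of_pos (by simp)]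
              have hdw : List.dropWhile (fun y => y == a) (a :: a :: m)
                  = List.dropWhile (fun y => y == a) m := by
                rw [List.dropWhile_cons_of_pos (by simp), List.dropWhile_cons_of_pos (by simp)]
              simp only [htw, hdw, List.length_cons]
              simp
            · -- run of length exactly 2: both sides are true
              have hp := hgood a rfl
              have ht : List.takeWhile (fun y => y == a) rest = [] := by
                cases rest with
                | nil => rfl
                | cons c m =>
                    rw [List.takeWhile_cons_of_neg]
                    simp only [beq_eq_false_iff_ne, ne_eq, beq_iff_eq]
                    intro h; exact hr (by simp [h])
              have hc : ((a == a) && (some a != p) && (some a != rest.head?)) = true := by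
                simp only [BEq.rfl, Bool.true_and, Bool.and_eq_true, bne_iff_ne, ne_eq]
                exact ⟨fun h => hp h.symm, fun h => hr h.symm⟩
              rw [scanB_step, hc, if_pos rfl, alt_cons]
              rw [show List.takeWhile (fun y => y == a) (a :: rest) = [a] by
                    rw [List.takeWhile_cons_of_pos (by simp), ht]]
              simp
          · -- first run has length 1: drop the head on both sides
            have hba : ¬ ((b == a) = true) := by
              simp only [beq_iff_eq]; exact fun h => hab h.symm
            have halt : has_double_alt (a :: b :: rest) = has_double_alt (b :: rest) := by
              rw [alt_cons,
                  List.takeWhile_cons_of_neg (p := fun y => y == a) hba,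
                  List.dropWhile_cons_of_neg (p := fun y => y == a) hba]
              simp
            have hc : ((a == b) && (some a != p) && (some a != rest.head?)) = false := by
              simp [hab]
            rw [scanB_step, hc]
            simp only [Bool.false_eq_true, if_false]
            rw [halt]
            exact ih (b :: rest) (some a) (by simp at hl ⊢; omega)
              (by intro x hx hpx
                  simp only [List.head?_cons, Option.some.injEq] at hx hpx
                  exact hab (hpx.trans hx.symm))

-- ===== VERDICT (by name: the statement is the Claim_ definition above) =====
theorem has_double_spec : Claim_equal_has_double := by
  intro pwd _
  unfold Spec_has_double has_double
  have h0 := loopA_eq_scanB pwd pwd.length 0 (by omega)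
  simp only [Nat.cast_zero, List.drop_zero] at h0
  rw [h0]
  exact scanB_eq_alt pwd.length pwd none le_rfl (by simp)
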